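-- pv_equiv track=rewrite | github.com/Nithish9345/Atleast_oneGreater_element | Alteast_oneGreater_element.py | arr_greater
-- ===== SOURCE A (Python) =====
-- def arr_greater(arr):
--     size = len(arr)
--     max_value = float("-inf")
--     for i in range(size):
--         if max_value < arr[i]:
--             max_value = arr[i]
--     count = 0
--
--     for j in range(size):
--         if max_value == arr[j]:
--             count += 1
--
--     return size - count
-- ===== SOURCE B (Python) =====
-- def arr_greater(arr):
--     max_value = float("-inf")
--     count = 0
--     for x in arr:
--         if x > max_value:
--             max_value = x
--             count = 1
--         elif x == max_value:
--             count += 1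
--     return len(arr) - count
-- ===== Notes on version B (the rewrite author's own statement) =====
-- stated objective: alternative
-- what changed: Fuses A's two scans (find max, then count its occurrences) into one pass that maintains the running max together with its occurrence count, resetting the count when a strictly larger element appears.
import Mathlib
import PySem

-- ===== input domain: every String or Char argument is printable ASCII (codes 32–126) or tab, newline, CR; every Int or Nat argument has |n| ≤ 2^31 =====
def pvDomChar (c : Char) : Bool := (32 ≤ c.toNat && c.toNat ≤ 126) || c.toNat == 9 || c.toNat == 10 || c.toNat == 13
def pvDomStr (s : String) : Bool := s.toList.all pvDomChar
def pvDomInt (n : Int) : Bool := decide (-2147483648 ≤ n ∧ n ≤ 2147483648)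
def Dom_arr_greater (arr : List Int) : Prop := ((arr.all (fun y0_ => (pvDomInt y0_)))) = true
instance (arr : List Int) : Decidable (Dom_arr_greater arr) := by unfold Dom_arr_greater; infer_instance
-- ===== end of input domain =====

-- B fuses A's two scans into one pass maintaining the running max and its occurrence count.


-- ===== PORT A =====
-- float("-inf") is modelled as `none : Option Int`: `-inf < x` is always true and
-- `-inf == x` always false for an int x, which is exact on the Int domain.
def arr_greater (arr : List Int) : Int :=
  let size : Int := arr.length
  let max_value : Option Int :=
    arr.foldl (fun m x => if (match m with | none => true | some v => v < x) then some x else m) none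
  let count : Int := arr.foldl (fun c x => if max_value = some x then c + 1 else c) 0
  size - count

-- ===== PORT B =====
def arr_greater_alt (arr : List Int) : Int :=
  let st : Option Int × Int :=
    arr.foldl (fun (s : Option Int × Int) x =>
      if (match s.1 with | none => true | some v => v < x) then (some x, 1)
      else if s.1 = some x then (s.1, s.2 + 1)
      else s) (none, 0)
  (arr.length : Int) - st.2

-- ===== PRECONDITION & SPEC =====
def Spec_arr_greater (arr : List Int) (out : Int) : Prop := out = arr_greater_alt arr
instance (arr : List Int) (out : Int) : Decidable (Spec_arr_greater arr out) := by unfold Spec_arr_greater; infer_instance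

-- ===== CLAIM (what is proved, stated in full; the proofs are below) =====
def Claim_equal_arr_greater : Prop := ∀ (arr : List Int), Dom_arr_greater arr → Spec_arr_greater arr (arr_greater arr)

-- ===== LEMMAS AND PROOFS =====

def pvMaxA (v : Int) : List Int → Int
  | [] => v
  | x :: xs => pvMaxA (if v < x then x else v) xs

def pvCnt (w : Int) : List Int → Int
  | [] => 0
  | x :: xs => (if x = w then 1 else 0) + pvCnt w xs

theorem pvMaxA_le (l : List Int) : ∀ v : Int, v ≤ pvMaxA v l := by
  induction l with
  | nil => intro v; simp [pvMaxA]
  | cons x xs ih =>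
    intro v
    simp only [pvMaxA]
    by_cases h : v < x
    · simp only [h, if_true]; exact le_of_lt (lt_of_lt_of_le h (ih x))
    · simp only [h, if_false]; exact ih v

theorem pvMaxFoldA (l : List Int) : ∀ v : Int,
    l.foldl (fun m x => if (match m with | none => true | some v => v < x) then some x else m) (some v)
      = some (pvMaxA v l) := by
  induction l with
  | nil => intro v; simp [pvMaxA]
  | cons x xs ih =>
    intro v
    simp only [List.foldl, pvMaxA]
    by_cases h : v < x <;> simp [h, ih]

theorem pvCntFoldA (l : List Int) : ∀ (w c : Int),
    l.foldl (fun c x => if (some w : Option Int) = some x then c + 1 else c) c = c + pvCnt w l := by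
  induction l with
  | nil => intro w c; simp [pvCnt]
  | cons x xs ih =>
    intro w c
    simp only [List.foldl, pvCnt]
    by_cases h : x = w
    · subst h
      rw [if_pos rfl, ih x (c + 1), if_pos rfl]
      ring
    · rw [if_neg (by simpa using Ne.symm h), ih w c, if_neg h]
      ring

theorem pvKeyB (l : List Int) : ∀ (v c : Int),
    l.foldl (fun (s : Option Int × Int) x =>
      if (match s.1 with | none => true | some v => v < x) then (some x, 1)
      else if s.1 = some x then (s.1, s.2 + 1)
      else s) (some v, c)
    = (some (pvMaxA v l),
       if pvMaxA v l = v then c + pvCnt v l else pvCnt (pvMaxA v l) l) := by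
  induction l with
  | nil => intro v c; simp [pvMaxA, pvCnt]
  | cons x xs ih =>
    intro v c
    simp only [List.foldl, pvCnt, pvMaxA]
    by_cases h : v < x
    · rw [if_pos (show decide (v < x) = true by simpa using h)]
      simp only [show (if v < x then x else v) = x from if_pos h]
      rw [ih x 1]
      have hne : pvMaxA x xs ≠ v := by have := pvMaxA_le xs x; omega
      rw [if_neg hne]
      by_cases hm : pvMaxA x xs = x
      · rw [hm]; simp
      · rw [if_neg hm, if_neg (fun e => hm e.symm)]; ring_nf
    · by_cases he : x = v
      · subst he
        rw [if_neg (show ¬ decide (x < x) = true by simpa using h)]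
        simp only [show (if x < x then x else x) = x from if_neg h]
        simp only [if_true]
        rw [ih x (c + 1)]
        by_cases hm : pvMaxA x xs = x
        · rw [if_pos hm, if_pos hm, hm]; simp; ring
        · rw [if_neg hm, if_neg hm, if_neg (fun e => hm e.symm)]; ring_nf
      · rw [if_neg (show ¬ decide (v < x) = true by simpa using h),
            if_neg (show ¬ (some v : Option Int) = some x by simpa using Ne.symm he)]
        simp only [show (if v < x then x else v) = v from if_neg h]
        rw [ih v c]
        have hx_lt : x < v := lt_of_le_of_ne (le_of_not_gt h) he
        have hv_le : v ≤ pvMaxA v xs := pvMaxA_le xs v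
        by_cases hm : pvMaxA v xs = v
        · rw [if_pos hm, if_pos hm, if_neg he]; ring_nf
        · rw [if_neg hm, if_neg hm, if_neg (by omega : ¬ x = pvMaxA v xs)]; ring_nf

-- ===== VERDICT (by name: the statement is the Claim_ definition above) =====
theorem arr_greater_spec : Claim_equal_arr_greater := by
  intro arr _
  show arr_greater arr = arr_greater_alt arr
  cases arr with
  | nil => rfl
  | cons x xs =>
    have hmax : (x :: xs).foldl
        (fun m y => if (match m with | none => true | some v => v < y) then some y else m)
        (none : Option Int) = some (pvMaxA x xs) := by
      show xs.foldl
        (fun m y => if (match m with | none => true | some v => v < y) then some y else m)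
        (some x) = some (pvMaxA x xs)
      exact pvMaxFoldA xs x
    have hB : (x :: xs).foldl
        (fun (s : Option Int × Int) y =>
          if (match s.1 with | none => true | some v => v < y) then (some y, 1)
          else if s.1 = some y then (s.1, s.2 + 1)
          else s) (none, 0)
        = (some (pvMaxA x xs),
           if pvMaxA x xs = x then 1 + pvCnt x xs else pvCnt (pvMaxA x xs) xs) := by
      show xs.foldl
          (fun (s : Option Int × Int) y =>
            if (match s.1 with | none => true | some v => v < y) then (some y, 1)
            else if s.1 = some y then (s.1, s.2 + 1)
            else s) (some x, 1)
        = (some (pvMaxA x xs),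
           if pvMaxA x xs = x then 1 + pvCnt x xs else pvCnt (pvMaxA x xs) xs)
      exact pvKeyB xs x 1
    simp only [arr_greater, arr_greater_alt, hmax, hB]
    rw [pvCntFoldA (x :: xs) (pvMaxA x xs) 0]
    by_cases hm : pvMaxA x xs = x
    · simp [hm, pvCnt]
    · have hxne : x ≠ pvMaxA x xs := fun e => hm e.symm
      simp [hm, pvCnt, hxne]
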